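-- pv_equiv track=rewrite | github.com/zseen/hackerrank-challenges | Implementation/PickingNumbers/PickingNumbers.py | differenceIsLessThanOne
-- ===== SOURCE A (Python) =====
-- def differenceIsLessThanOne(numbersList):
--     maximum = 0
--     for item in numbersList:
--         numBig = numbersList.count(item)
--         numSmall = numbersList.count(item - 1)
--         total = numBig + numSmall
--         if total > maximum:
--             maximum = total
--     return maximum
-- ===== SOURCE B (Python) =====
-- def differenceIsLessThanOne(numbersList):
--     # Sort, then one linear scan tracking the current equal-value run and the
--     # run of the immediately preceding value; the best window of width <= 1 in
--     # the sorted order is the answer.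
--     best = 0
--     prev = None
--     cur_run = 0
--     prev_run = 0
--     for x in sorted(numbersList):
--         if prev is not None and x == prev:
--             cur_run += 1
--         elif prev is not None and x - prev == 1:
--             prev_run = cur_run
--             cur_run = 1
--         else:
--             prev_run = 0
--             cur_run = 1
--         if cur_run + prev_run > best:
--             best = cur_run + prev_run
--         prev = x
--     return best
-- ===== Notes on version B (the rewrite author's own statement) =====
-- stated objective: faster
-- what changed: Instead of A's nested full-list recount for every element, B sorts the list once and does a single linear scan that tracks the current equal-value run and the immediately preceding value's run, taking the max of their sum.
import Mathlib
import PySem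

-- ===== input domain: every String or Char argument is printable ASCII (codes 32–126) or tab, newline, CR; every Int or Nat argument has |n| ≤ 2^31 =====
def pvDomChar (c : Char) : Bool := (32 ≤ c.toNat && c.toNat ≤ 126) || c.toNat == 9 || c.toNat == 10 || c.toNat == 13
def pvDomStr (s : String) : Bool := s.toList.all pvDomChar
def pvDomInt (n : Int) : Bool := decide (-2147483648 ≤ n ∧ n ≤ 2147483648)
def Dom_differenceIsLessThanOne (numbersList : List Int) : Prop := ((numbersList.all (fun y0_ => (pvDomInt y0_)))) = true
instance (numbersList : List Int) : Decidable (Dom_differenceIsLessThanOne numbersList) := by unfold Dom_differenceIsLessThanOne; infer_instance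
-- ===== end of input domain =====

-- B sorts the list once and makes a single linear scan tracking the current equal-value
-- run and the preceding value's run, instead of A's recount-of-the-whole-list per element
-- (objective: faster, asymptotic).


-- ===== PORT A =====
def differenceIsLessThanOne (numbersList : List Int) : Int :=
  numbersList.foldl (fun maximum item =>
    let numBig : Int := numbersList.count item
    let numSmall : Int := numbersList.count (item - 1)
    let total := numBig + numSmall
    if total > maximum then total else maximum) 0

-- ===== PORT B =====
-- one step of B's scan; state = (best, prev, cur_run, prev_run)
def altStep (st : Int × Option Int × Int × Int) (x : Int) : Int × Option Int × Int × Int :=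
  let best := st.1
  let prev := st.2.1
  let curRun := st.2.2.1
  let prevRun := st.2.2.2
  -- (new prev_run, new cur_run), Python's three branches in order
  let pc : Int × Int :=
    match prev with
    | some p =>
      if x = p then (prevRun, curRun + 1)
      else if x - p = 1 then (curRun, 1)
      else (0, 1)
    | none => (0, 1)
  let newBest := if pc.2 + pc.1 > best then pc.2 + pc.1 else best
  (newBest, some x, pc.2, pc.1)

def differenceIsLessThanOne_alt (numbersList : List Int) : Int :=
  ((PySem.List.sorted numbersList (fun x => x) false).foldl altStep (0, none, 0, 0)).1

-- ===== PRECONDITION & SPEC =====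
def Spec_differenceIsLessThanOne (numbersList : List Int) (out : Int) : Prop := out = differenceIsLessThanOne_alt numbersList
instance (numbersList : List Int) (out : Int) : Decidable (Spec_differenceIsLessThanOne numbersList out) := by unfold Spec_differenceIsLessThanOne; infer_instance

-- ===== CLAIM (what is proved, stated in full; the proofs are below) =====
def Claim_equal_differenceIsLessThanOne : Prop := ∀ (numbersList : List Int), Dom_differenceIsLessThanOne numbersList → Spec_differenceIsLessThanOne numbersList (differenceIsLessThanOne numbersList)

-- ===== LEMMAS AND PROOFS =====

-- the score of value y: its count, plus the count of y-1, plus the virtual prefix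
-- of cr copies of p and pr copies of (p-1) already consumed by the scan
def pvF (p cr pr : Int) (s : List Int) (y : Int) : Int :=
  (s.count y : Int) + (s.count (y - 1) : Int) +
    (if y = p then cr + pr else if y = p + 1 then cr else 0)

theorem ite_gt_eq_max (m t : Int) : (if t > m then t else m) = max m t := by
  rw [max_def]; split_ifs <;> omega

theorem foldl_max_mono (l : List Int) (b b' : Int) (h : b ≤ b') :
    l.foldl max b ≤ l.foldl max b' := by
  rcases PySem.List.foldl_max_mem l b with he | hm
  · rw [he]; exact le_trans h (PySem.List.le_foldl_max l b').1
  · exact (PySem.List.le_foldl_max l b').2 _ hm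

theorem foldl_max_absorb (l : List Int) (b c : Int) (h : ∃ y ∈ l, c ≤ y) :
    l.foldl max (max b c) = l.foldl max b := by
  refine le_antisymm ?_ (foldl_max_mono l b (max b c) (le_max_left _ _))
  rcases PySem.List.foldl_max_mem l (max b c) with he | hm
  · rw [he]
    rcases h with ⟨y, hy, hcy⟩
    exact max_le (PySem.List.le_foldl_max l b).1
      (le_trans hcy ((PySem.List.le_foldl_max l b).2 _ hy))
  · exact (PySem.List.le_foldl_max l b).2 _ hm

theorem foldl_max_perm (l₁ l₂ : List Int) (b : Int) (h : l₁.Perm l₂) :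
    l₁.foldl max b = l₂.foldl max b := by
  refine le_antisymm ?_ ?_ <;>
  · rcases PySem.List.foldl_max_mem _ b with he | hm
    · rw [he]; first
        | exact (PySem.List.le_foldl_max l₂ b).1
        | exact (PySem.List.le_foldl_max l₁ b).1
    · first
        | exact (PySem.List.le_foldl_max l₂ b).2 _ (h.mem_iff.mp hm)
        | exact (PySem.List.le_foldl_max l₁ b).2 _ (h.mem_iff.mpr hm)

theorem count_eq_zero_of_lt (t : List Int) (p : Int) (h : ∀ y ∈ t, p ≤ y) (z : Int)
    (hz : z < p) : t.count z = 0 :=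
  List.count_eq_zero.mpr (fun hm => absurd (h z hm) (not_le.mpr hz))

-- invariant of B's scan: starting from state (best, some p, cr, pr) on a sorted tail s
-- whose elements are all ≥ p, the final best is the running max of pvF over s
theorem foldl_max_start_eq (l : List Int) (best a c : Int) (ha : a ≤ c)
    (h : c = a ∨ ∃ y ∈ l, c ≤ y) :
    l.foldl max (max best a) = l.foldl max (max best c) := by
  rcases h with rfl | h
  · rfl
  · have hm : max best c = max (max best a) c := by omega
    rw [hm, foldl_max_absorb l (max best a) c h]

-- invariant of B's scan: starting from state (best, some p, cr, pr) on a sorted tail s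
-- whose elements are all ≥ p, the final best is the running max of pvF over s
theorem pvInv (s : List Int) : ∀ (p cr pr best : Int),
    List.Pairwise (· ≤ ·) s → (∀ y ∈ s, p ≤ y) →
    (s.foldl altStep (best, some p, cr, pr)).1
      = (s.map (pvF p cr pr s)).foldl max best := by
  induction s with
  | nil => intro p cr pr best _ _; rfl
  | cons x t ih =>
    intro p cr pr best hpw hlb
    have hpx : p ≤ x := hlb x (List.mem_cons_self ..)
    have hpw' : List.Pairwise (· ≤ ·) t := (List.pairwise_cons.mp hpw).2
    have hxt : ∀ y ∈ t, x ≤ y := (List.pairwise_cons.mp hpw).1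
    have hlt : t.count (x - 1) = 0 :=
      count_eq_zero_of_lt t x hxt (x - 1) (by omega)
    by_cases hxp : x = p
    · -- same value continues the current run
      subst hxp
      have hstep : altStep (best, some x, cr, pr) x
          = (if cr + 1 + pr > best then cr + 1 + pr else best, some x, cr + 1, pr) := by
        simp [altStep, add_comm]
      rw [List.foldl_cons, hstep, ih x (cr + 1) pr _ hpw' hxt]
      have hmap : t.map (pvF x (cr + 1) pr t) = t.map (pvF x cr pr (x :: t)) := by
        refine List.map_congr_left (fun y hy => ?_)
        simp only [pvF, List.count_cons, beq_iff_eq]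
        split_ifs <;> push_cast <;> omega
      rw [ite_gt_eq_max, List.map_cons, List.foldl_cons, ← hmap]
      have hFx : pvF x cr pr (x :: t) x = (cr + 1 + pr) + (t.count x : Int) := by
        simp only [pvF, List.count_cons, beq_iff_eq]
        split_ifs <;> push_cast <;> omega
      rw [hFx]
      by_cases hmem : x ∈ t
      · refine foldl_max_start_eq _ best (cr + 1 + pr) _ (by omega)
          (Or.inr ⟨pvF x (cr + 1) pr t x, List.mem_map_of_mem hmem, ?_⟩)
        simp only [pvF]
        split_ifs <;> omega
      · have hc : t.count x = 0 := List.count_eq_zero.mpr hmem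
        rw [hc]
        norm_num
    · by_cases hx1 : x - p = 1
      · -- adjacent value: previous run becomes prev_run
        have hstep : altStep (best, some p, cr, pr) x
            = (if 1 + cr > best then 1 + cr else best, some x, 1, cr) := by
          simp [altStep, hxp, hx1]
        rw [List.foldl_cons, hstep, ih x 1 cr _ hpw' hxt]
        have hmap : t.map (pvF x 1 cr t) = t.map (pvF p cr pr (x :: t)) := by
          refine List.map_congr_left (fun y hy => ?_)
          have hxy : x ≤ y := hxt y hy
          simp only [pvF, List.count_cons, beq_iff_eq]
          split_ifs <;> push_cast <;> omega
        rw [ite_gt_eq_max, List.map_cons, List.foldl_cons, ← hmap]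
        have hFx : pvF p cr pr (x :: t) x = (1 + cr) + (t.count x : Int) := by
          simp only [pvF, List.count_cons, beq_iff_eq]
          split_ifs <;> push_cast <;> omega
        rw [hFx]
        by_cases hmem : x ∈ t
        · refine foldl_max_start_eq _ best (1 + cr) _ (by omega)
            (Or.inr ⟨pvF x 1 cr t x, List.mem_map_of_mem hmem, ?_⟩)
          simp only [pvF]
          split_ifs <;> omega
        · have hc : t.count x = 0 := List.count_eq_zero.mpr hmem
          rw [hc]
          norm_num
      · -- gap of at least 2: both runs restart
        have hstep : altStep (best, some p, cr, pr) x
            = (if 1 + 0 > best then 1 + 0 else best, some x, 1, 0) := by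
          simp [altStep, hxp, hx1]
        rw [List.foldl_cons, hstep, ih x 1 0 _ hpw' hxt]
        have hmap : t.map (pvF x 1 0 t) = t.map (pvF p cr pr (x :: t)) := by
          refine List.map_congr_left (fun y hy => ?_)
          have hxy : x ≤ y := hxt y hy
          simp only [pvF, List.count_cons, beq_iff_eq]
          split_ifs <;> push_cast <;> omega
        rw [ite_gt_eq_max, List.map_cons, List.foldl_cons, ← hmap]
        have hFx : pvF p cr pr (x :: t) x = (1 + 0) + (t.count x : Int) := by
          simp only [pvF, List.count_cons, beq_iff_eq]
          split_ifs <;> push_cast <;> omega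
        rw [hFx]
        by_cases hmem : x ∈ t
        · refine foldl_max_start_eq _ best (1 + 0) _ (by omega)
            (Or.inr ⟨pvF x 1 0 t x, List.mem_map_of_mem hmem, ?_⟩)
          simp only [pvF]
          split_ifs <;> omega
        · have hc : t.count x = 0 := List.count_eq_zero.mpr hmem
          rw [hc]
          norm_num

-- ===== VERDICT (by name: the statement is the Claim_ definition above) =====
theorem differenceIsLessThanOne_spec : Claim_equal_differenceIsLessThanOne := by
  intro xs _
  unfold Spec_differenceIsLessThanOne differenceIsLessThanOne differenceIsLessThanOne_alt
  have hperm : (PySem.List.sorted xs (fun x => x) false).Perm xs := PySem.List.sorted_perm xs (fun x => x) false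
  have hpw : List.Pairwise (· ≤ ·) (PySem.List.sorted xs (fun x => x) false) := by
    simpa using PySem.List.sorted_pairwise (xs := xs) (key := fun x => x)
  -- A's loop is a running max of the score function over xs
  have hA : xs.foldl (fun maximum item =>
        let numBig : Int := xs.count item
        let numSmall : Int := xs.count (item - 1)
        let total := numBig + numSmall
        if total > maximum then total else maximum) 0
      = (xs.map (fun y => ((xs.count y : Int) + (xs.count (y - 1) : Int)))).foldl max 0 := by
    rw [List.foldl_map]
    simp only [ite_gt_eq_max]
  rw [hA]
  -- counts are invariant under sorting, and the running max is permutation-invariant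
  have hcnt : (fun y => ((xs.count y : Int) + (xs.count (y - 1) : Int)))
      = (fun y => (((PySem.List.sorted xs (fun x => x) false).count y : Int)
          + ((PySem.List.sorted xs (fun x => x) false).count (y - 1) : Int))) := by
    funext y
    rw [hperm.count_eq, hperm.count_eq]
  rw [hcnt, foldl_max_perm _ _ 0 (hperm.map _).symm]
  -- now work on the sorted list
  cases hs : PySem.List.sorted xs (fun x => x) false with
  | nil => rfl
  | cons m t =>
    rw [hs] at hpw
    have hpw' : List.Pairwise (· ≤ ·) t := (List.pairwise_cons.mp hpw).2
    have hmt : ∀ y ∈ t, m ≤ y := (List.pairwise_cons.mp hpw).1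
    have hlt : t.count (m - 1) = 0 :=
      count_eq_zero_of_lt t m hmt (m - 1) (by omega)
    have hstep : altStep (0, none, 0, 0) m
        = (if 1 + 0 > 0 then 1 + 0 else 0, some m, 1, 0) := rfl
    rw [List.foldl_cons, hstep, pvInv t m 1 0 _ hpw' hmt,
      List.map_cons, List.foldl_cons]
    have hmap : t.map (pvF m 1 0 t)
        = t.map (fun y => (((m :: t).count y : Int) + ((m :: t).count (y - 1) : Int))) := by
      refine List.map_congr_left (fun y hy => ?_)
      have hmy : m ≤ y := hmt y hy
      simp only [pvF, List.count_cons, beq_iff_eq]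
      split_ifs <;> push_cast <;> omega
    have hFm : (((m :: t).count m : Int) + ((m :: t).count (m - 1) : Int))
        = (1 + 0) + (t.count m : Int) := by
      simp only [List.count_cons, beq_iff_eq]
      split_ifs <;> push_cast <;> omega
    rw [← hmap, hFm]
    have hstart : (t.map (pvF m 1 0 t)).foldl max (max 0 (1 + 0 + (t.count m : Int)))
        = (t.map (pvF m 1 0 t)).foldl max (max 0 (1 + 0)) := by
      refine (foldl_max_start_eq _ 0 (1 + 0) (1 + 0 + (t.count m : Int)) (by omega) ?_).symm
      by_cases hmem : m ∈ t
      · refine Or.inr ⟨pvF m 1 0 t m, List.mem_map_of_mem hmem, ?_⟩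
        simp only [pvF]
        split_ifs <;> omega
      · have hc : t.count m = 0 := List.count_eq_zero.mpr hmem
        exact Or.inl (by rw [hc]; norm_num)
    rw [hstart]
    norm_num
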